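-- pv_equiv track=rewrite | github.com/EshantDazz/Data-Structures | Bit Magic/CHeck if Kth Bit is set.py | isSet1
-- ===== SOURCE A (Python) =====
-- def isSet1(n,k):
--     x=1
--     for i in range(0,k-1):
--         x*=2
--     if(x&n!=0):
--         return True
--     else:
--         return False
-- ===== SOURCE B (Python) =====
-- def isSet1(n, k):
--     return (1 << max(k - 1, 0)) & n != 0
-- ===== Notes on version B (the rewrite author's own statement) =====
-- stated objective: faster
-- what changed: replaces the O(k) doubling loop that builds 2**(k-1) with a single left shift 1 << max(k-1,0), keeping the same mask-and-test
import Mathlib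
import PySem

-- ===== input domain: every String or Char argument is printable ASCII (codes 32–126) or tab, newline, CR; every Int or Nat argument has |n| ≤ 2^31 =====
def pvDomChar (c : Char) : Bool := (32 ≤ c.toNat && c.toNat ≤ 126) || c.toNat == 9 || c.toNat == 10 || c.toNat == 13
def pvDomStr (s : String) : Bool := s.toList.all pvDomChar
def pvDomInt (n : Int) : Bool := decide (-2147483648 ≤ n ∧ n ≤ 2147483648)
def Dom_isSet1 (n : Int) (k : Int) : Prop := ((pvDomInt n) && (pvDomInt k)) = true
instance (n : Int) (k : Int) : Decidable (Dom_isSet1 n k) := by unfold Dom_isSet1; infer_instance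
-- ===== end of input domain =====

-- B replaces A's O(k) doubling loop for 2**(k-1) by one left shift (1 << max(k-1,0)): faster.

-- ===== PORT A =====
def isSet1 (n : Int) (k : Int) : Bool :=
  let x : Int := (PySem.List.pyRange 0 (k - 1) 1).foldl (fun x _ => x * 2) 1
  if PySem.Int.band x n ≠ 0 then true else false

-- ===== PORT B =====
def isSet1_alt (n : Int) (k : Int) : Bool :=
  decide (PySem.Int.band ((1 : Int) <<< (max (k - 1) 0).toNat) n ≠ 0)

-- ===== PRECONDITION & SPEC =====
def Spec_isSet1 (n : Int) (k : Int) (out : Bool) : Prop := out = isSet1_alt n k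
instance (n : Int) (k : Int) (out : Bool) : Decidable (Spec_isSet1 n k out) := by unfold Spec_isSet1; infer_instance

-- ===== CLAIM (what is proved, stated in full; the proofs are below) =====
def Claim_equal_isSet1 : Prop := ∀ (n : Int) (k : Int), Dom_isSet1 n k → Spec_isSet1 n k (isSet1 n k)

-- ===== LEMMAS AND PROOFS =====

theorem foldl_double (l : List Int) (init : Int) :
    l.foldl (fun x _ => x * 2) init = init * 2 ^ l.length := by
  induction l generalizing init with
  | nil => simp
  | cons a t ih => simp [List.foldl, ih, pow_succ]; ring

theorem loop_eq_shift (k : Int) :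
    (PySem.List.pyRange 0 (k - 1) 1).foldl (fun x _ => x * 2) 1
      = (1 : Int) <<< (max (k - 1) 0).toNat := by
  rw [foldl_double, PySem.List.length_pyRange_one]
  have : (k - 1 - 0).toNat = (max (k - 1) 0).toNat := by omega
  rw [this, Int.shiftLeft_eq]

-- ===== VERDICT (by name: the statement is the Claim_ definition above) =====
theorem isSet1_spec : Claim_equal_isSet1 := by
  intro n k _
  unfold Spec_isSet1 isSet1 isSet1_alt
  rw [loop_eq_shift]
  by_cases h : PySem.Int.band ((1 : Int) <<< (max (k - 1) 0).toNat) n ≠ 0 <;> simp [h]
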